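-- pv_equiv track=rewrite | github.com/davidmartinrius/speech-dataset-generator | speech_dataset_generator/dataset_generator/dataset_generator.py | get_gender
-- ===== SOURCE A (Python) =====
-- def get_gender(segmentation):
--
--     labels = [item[0] for item in segmentation if item[0] in ('male', 'female')]
--
--     if 'male' in labels:
--         return 'male'
--     elif 'female' in labels:
--         return 'female'
--     else:
--         return 'no_gender'
-- ===== SOURCE B (Python) =====
-- _RANK = {'male': 0, 'female': 1}
--
-- def get_gender(segmentation):
--     rank = min((_RANK.get(item[0], 2) for item in segmentation), default=2)
--     return ('male', 'female', 'no_gender')[rank]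
-- ===== Notes on version B (the rewrite author's own statement) =====
-- stated objective: alternative
-- what changed: Replaces the filtered label list plus two membership scans with an arithmetic formulation: each label is mapped to a numeric priority rank (male=0, female=1, other=2), the minimum rank is taken with min(), and the answer is looked up in a result tuple by that rank.
import Mathlib
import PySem

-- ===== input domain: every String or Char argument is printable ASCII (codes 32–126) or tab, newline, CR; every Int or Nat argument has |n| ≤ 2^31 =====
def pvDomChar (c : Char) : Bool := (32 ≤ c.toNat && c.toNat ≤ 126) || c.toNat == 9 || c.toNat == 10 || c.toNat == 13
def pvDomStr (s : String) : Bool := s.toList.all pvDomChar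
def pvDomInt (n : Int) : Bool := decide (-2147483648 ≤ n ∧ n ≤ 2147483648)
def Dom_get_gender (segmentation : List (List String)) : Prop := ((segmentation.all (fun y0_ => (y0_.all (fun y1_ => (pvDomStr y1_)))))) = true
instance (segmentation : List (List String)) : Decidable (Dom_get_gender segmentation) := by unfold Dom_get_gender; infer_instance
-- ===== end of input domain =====

-- B replaces A's filtered list + membership scans with a min over numeric priority ranks indexed into a result tuple (objective: alternative).


-- ===== PORT A =====
-- item[0]: PySem.List.pyGet? with a default reachable only outside Pre_ (Python raises IndexError there)
def get_gender (segmentation : List (List String)) : String :=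
  let labels := segmentation.foldl
    (fun acc item =>
      let x := (PySem.List.pyGet? item 0).getD ""
      if x == "male" || x == "female" then acc ++ [x] else acc) []
  if labels.contains "male" then "male"
  else if labels.contains "female" then "female"
  else "no_gender"

-- ===== PORT B =====
-- _RANK.get(item[0], 2)
def pvRankOf (item : List String) : Nat :=
  let label := (PySem.List.pyGet? item 0).getD ""
  if label == "male" then 0 else if label == "female" then 1 else 2

-- min(..., default=2) over the mapped ranks, then tuple lookup by rank
def get_gender_alt (segmentation : List (List String)) : String :=
  let rank := segmentation.foldl (fun r item => min r (pvRankOf item)) 2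
  (PySem.List.pyGet? ["male", "female", "no_gender"] (rank : Int)).getD ""

-- ===== PRECONDITION & SPEC =====
-- Pre_ excludes segmentations containing an empty item: there Python's item[0] raises IndexError (in A and in B alike).
def Pre_get_gender (segmentation : List (List String)) : Prop :=
  ∀ item ∈ segmentation, item ≠ []
instance (segmentation : List (List String)) : Decidable (Pre_get_gender segmentation) := by unfold Pre_get_gender; infer_instance
def pvWitness_get_gender : List (List String) := [["female", "0.1"], ["male", "0.9"]]
def Spec_get_gender (segmentation : List (List String)) (out : String) : Prop := out = get_gender_alt segmentation
instance (segmentation : List (List String)) (out : String) : Decidable (Spec_get_gender segmentation out) := by unfold Spec_get_gender; infer_instance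

-- ===== CLAIM (what is proved, stated in full; the proofs are below) =====
def Claim_equal_get_gender : Prop := ∀ (segmentation : List (List String)), Dom_get_gender segmentation → Pre_get_gender segmentation → Spec_get_gender segmentation (get_gender segmentation)

-- ===== LEMMAS AND PROOFS =====

-- A's filtered list contains s ∈ {"male","female"} iff some item's label equals s.
theorem get_gender_contains (seg : List (List String)) (acc : List String) (s : String)
    (hs : s = "male" ∨ s = "female") :
    (seg.foldl
      (fun acc item =>
        let x := (PySem.List.pyGet? item 0).getD ""
        if x == "male" || x == "female" then acc ++ [x] else acc) acc).contains s
    = (acc.contains s || seg.any (fun it => (PySem.List.pyGet? it 0).getD "" == s)) := by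
  induction seg generalizing acc with
  | nil => simp
  | cons hd tl ih =>
    rw [List.foldl_cons, List.any_cons]
    by_cases hm : (PySem.List.pyGet? hd 0).getD "" = "male"
    · simp only [hm]
      rw [if_pos (by decide), ih (acc ++ ["male"])]
      rcases hs with rfl | rfl <;> simp
    · by_cases hf : (PySem.List.pyGet? hd 0).getD "" = "female"
      · simp only [hf]
        rw [if_pos (by decide), ih (acc ++ ["female"])]
        rcases hs with rfl | rfl <;> simp
      · have hc : (((PySem.List.pyGet? hd 0).getD "" == "male")
            || ((PySem.List.pyGet? hd 0).getD "" == "female")) = false := by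
          simp [hm, hf]
        simp only [hc]
        rw [if_neg (by simp), ih acc]
        have b1 : ((PySem.List.pyGet? hd 0).getD "" == "male") = false := by simp [hm]
        have b2 : ((PySem.List.pyGet? hd 0).getD "" == "female") = false := by simp [hf]
        rcases hs with rfl | rfl <;> simp [b1, b2]

-- B's running minimum is determined by the same two existence facts.
theorem get_gender_min (seg : List (List String)) (r : Nat) (hr : r ≤ 2) :
    seg.foldl (fun r item => min r (pvRankOf item)) r
    = min r (if seg.any (fun it => (PySem.List.pyGet? it 0).getD "" == "male") then 0
             else if seg.any (fun it => (PySem.List.pyGet? it 0).getD "" == "female") then 1 else 2) := by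
  induction seg generalizing r with
  | nil => simp; omega
  | cons hd tl ih =>
    rw [List.foldl_cons, List.any_cons, List.any_cons]
    rw [ih _ (le_trans (min_le_left _ _) hr)]
    by_cases hm : (PySem.List.pyGet? hd 0).getD "" = "male"
    · have h0 : pvRankOf hd = 0 := by simp [pvRankOf, hm]
      have bm : ((PySem.List.pyGet? hd 0).getD "" == "male") = true := by simp [hm]
      simp only [h0, bm, Bool.true_or, if_true]
      omega
    · have bm : ((PySem.List.pyGet? hd 0).getD "" == "male") = false := by simp [hm]
      by_cases hf : (PySem.List.pyGet? hd 0).getD "" = "female"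
      · have h1 : pvRankOf hd = 1 := by simp [pvRankOf, hf]
        have bf : ((PySem.List.pyGet? hd 0).getD "" == "female") = true := by simp [hf]
        simp only [h1, bm, bf, Bool.false_or, Bool.true_or]
        split_ifs <;> omega
      · have h2 : pvRankOf hd = 2 := by simp [pvRankOf, hm, hf]
        have bf : ((PySem.List.pyGet? hd 0).getD "" == "female") = false := by simp [hf]
        simp only [h2, bm, bf, Bool.false_or]
        split_ifs <;> omega

-- ===== VERDICT (by name: the statement is the Claim_ definition above) =====
theorem get_gender_spec : Claim_equal_get_gender := by
  intro seg _ _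
  unfold Spec_get_gender get_gender get_gender_alt
  rw [get_gender_min seg 2 (by omega)]
  have hM := get_gender_contains seg [] "male" (Or.inl rfl)
  have hF := get_gender_contains seg [] "female" (Or.inr rfl)
  simp only [hM, hF, List.contains_nil, Bool.false_or]
  by_cases am : seg.any (fun it => (PySem.List.pyGet? it 0).getD "" == "male") = true
  · rw [if_pos am, if_pos am]; decide
  · by_cases af : seg.any (fun it => (PySem.List.pyGet? it 0).getD "" == "female") = true
    · rw [if_neg am, if_neg am, if_pos af, if_pos af]; decide
    · rw [if_neg am, if_neg am, if_neg af, if_neg af]; decide
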